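-- pv_equiv track=rewrite | github.com/christianebacani/Roadmap | Coding Challenges using Python and SQL/Code Wars Python Solved Problems/6 Kyu/string_suffixes.py | string_suffix
-- ===== SOURCE A (Python) =====
-- def string_suffix(str_: str) -> int:
--     suffixes = []
--
--     for i in range(len(str_)):
--         suffixes.append(str_[i:])
--
--     total = 0
--
--     for i in range(len(suffixes)):
--         list_of_length_of_prefixes = []
--
--         reverse_suffix = suffixes[i][::-1]
--
--         for j in range(len(reverse_suffix)):
--             if str_.startswith(reverse_suffix[j:][::-1]):
--                 list_of_length_of_prefixes.append(len(reverse_suffix[j:][::-1]))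
--
--         total += max(list_of_length_of_prefixes, default=0)
--
--     return total
-- ===== SOURCE B (Python) =====
-- def string_suffix(str_: str) -> int:
--     def lcp(a, b):
--         k = 0
--         for x, y in zip(a, b):
--             if x != y:
--                 return k
--             k += 1
--         return k
--
--     return sum(lcp(str_, str_[i:]) for i in range(len(str_)))
-- ===== Notes on version B (the rewrite author's own statement) =====
-- stated objective: faster
-- what changed: Instead of building every suffix, enumerating all its prefixes via double reversal, testing each with startswith and taking the max, B computes the longest common prefix of the string and each suffix directly by a single character-by-character scan and sums these lengths.
import Mathlib
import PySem

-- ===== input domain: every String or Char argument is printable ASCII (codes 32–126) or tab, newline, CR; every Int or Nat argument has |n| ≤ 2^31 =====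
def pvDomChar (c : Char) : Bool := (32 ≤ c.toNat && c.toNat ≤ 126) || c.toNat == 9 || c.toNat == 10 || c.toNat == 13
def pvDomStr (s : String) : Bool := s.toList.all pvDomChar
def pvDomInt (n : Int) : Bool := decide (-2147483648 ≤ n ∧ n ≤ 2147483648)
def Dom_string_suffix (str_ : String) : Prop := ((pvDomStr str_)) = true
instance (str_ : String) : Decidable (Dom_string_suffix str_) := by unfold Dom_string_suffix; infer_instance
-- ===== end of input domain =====

-- B replaces A's per-suffix enumeration of all reversed-slice prefixes + startswith + max
-- by a direct character-by-character longest-common-prefix scan per suffix (simpler and faster).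

-- ===== PORT A =====
-- literal port of A: build all suffixes, then for each suffix collect the lengths of its
-- prefixes (obtained as reverse_suffix[j:][::-1]) that str_ starts with, add max(…, default=0)
def string_suffix (str_ : String) : Int :=
  let s := str_.toList
  let suffixes : List (List Char) :=
    (PySem.List.pyRange 0 (PySem.List.len s) 1).foldl
      (fun acc i => acc ++ [PySem.List.slice s (some i) none]) []
  (PySem.List.pyRange 0 (PySem.List.len suffixes) 1).foldl
    (fun total i =>
      let suffix := PySem.List.pyGetD suffixes i []
      -- suffix[::-1] never raises: slice? with step -1 is always some (slice?_none_none_neg_one)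
      let reverse_suffix := (PySem.List.slice? suffix none none (-1)).getD []
      let list_of_length_of_prefixes : List Int :=
        (PySem.List.pyRange 0 (PySem.List.len reverse_suffix) 1).foldl
          (fun lst j =>
            if PySem.Chars.startswith s
                ((PySem.List.slice? (PySem.List.slice reverse_suffix (some j) none) none none (-1)).getD [])
            then lst ++
              [PySem.List.len ((PySem.List.slice? (PySem.List.slice reverse_suffix (some j) none) none none (-1)).getD [])]
            else lst) []
      total + PySem.List.maxD list_of_length_of_prefixes id 0) 0

-- ===== PORT B =====
-- port of Source B's lcp: k = 0; for (x, y) in zip(a, b): if x != y: return k; k += 1; return k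
def pvLcpGo : List (Char × Char) → Int → Int
  | [], k => k
  | (x, y) :: rest, k => if x ≠ y then k else pvLcpGo rest (k + 1)

def pvLcp (a b : List Char) : Int := pvLcpGo (a.zip b) 0

def string_suffix_alt (str_ : String) : Int :=
  let s := str_.toList
  (((PySem.List.pyRange 0 (PySem.List.len s) 1).map
      (fun i => pvLcp s (PySem.List.slice s (some i) none))).sum)

-- ===== PRECONDITION & SPEC =====
def Spec_string_suffix (str_ : String) (out : Int) : Prop := out = string_suffix_alt str_
instance (str_ : String) (out : Int) : Decidable (Spec_string_suffix str_ out) := by unfold Spec_string_suffix; infer_instance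

-- ===== CLAIM (what is proved, stated in full; the proofs are below) =====
def Claim_equal_string_suffix : Prop := ∀ (str_ : String), Dom_string_suffix str_ → Spec_string_suffix str_ (string_suffix str_)

-- ===== LEMMAS AND PROOFS =====

-- length (as a Nat) of the longest common prefix of two char lists
def lcpN : List Char → List Char → Nat
  | x :: xs, y :: ys => if x = y then lcpN xs ys + 1 else 0
  | _, _ => 0

theorem pvLcpGo_eq (a : List Char) : ∀ (b : List Char) (k : Int),
    pvLcpGo (a.zip b) k = k + lcpN a b := by
  induction a with
  | nil => intro b k; simp [pvLcpGo, lcpN]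
  | cons x xs ih =>
    intro b k
    cases b with
    | nil => simp [pvLcpGo, lcpN]
    | cons y ys =>
      by_cases h : x = y
      · subst h
        simp only [List.zip_cons_cons, pvLcpGo, lcpN, ne_eq, not_true_eq_false,
          if_false, ih, if_pos]
        push_cast; ring
      · simp [pvLcpGo, lcpN, h]

theorem pvLcp_eq (a b : List Char) : pvLcp a b = (lcpN a b : Int) := by
  simpa using pvLcpGo_eq a b 0

theorem lcpN_le (a : List Char) : ∀ b : List Char, lcpN a b ≤ b.length := by
  induction a with
  | nil => intro b; cases b <;> simp [lcpN]
  | cons x xs ih =>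
    intro b
    cases b with
    | nil => simp [lcpN]
    | cons y ys =>
      by_cases h : x = y
      · simpa [lcpN, h] using ih ys
      · simp [lcpN, h]

-- b.take k is a prefix of a iff k is at most the common-prefix length (for k ≤ |b|)
theorem take_prefix_iff_le_lcpN : ∀ (k : Nat) (a b : List Char), k ≤ b.length →
    (b.take k <+: a ↔ k ≤ lcpN a b) := by
  intro k
  induction k with
  | zero => intro a b _; simp
  | succ k ih =>
    intro a b hk
    cases b with
    | nil => simp at hk
    | cons y ys =>
      cases a with
      | nil => simp [lcpN]
      | cons x xs =>
        simp only [List.take_succ_cons, List.cons_prefix_cons, lcpN]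
        by_cases h : x = y
        · have := ih xs ys (by simpa using hk)
          simp [h, this]
        · simp only [if_neg h]
          constructor
          · rintro ⟨h', _⟩; exact absurd h'.symm h
          · omega

-- Python's max(xs, default=0) returns the maximum value
theorem maxD_eq_of_mem_of_ub (xs : List Int) (v d : Int) (hm : v ∈ xs)
    (hub : ∀ y ∈ xs, y ≤ v) : PySem.List.maxD xs id d = v := by
  have hne : xs ≠ [] := by rintro rfl; simp at hm
  obtain ⟨m, hmax⟩ : ∃ m, PySem.List.max? xs id = some m := by
    cases h : PySem.List.max? xs id with
    | none => exact absurd ((PySem.List.max?_eq_none_iff xs id).mp h) hne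
    | some m => exact ⟨m, rfl⟩
  have h1 : m ≤ v := hub m (PySem.List.max?_mem hmax)
  have h2 : v ≤ m := PySem.List.max?_isMax hmax v hm
  have : PySem.List.maxD xs id d = (PySem.List.max? xs id).getD d := rfl
  rw [this, hmax]; simp; omega

-- A's inner loop over the suffix t computes the common-prefix length of s and t
theorem inner_loop_eq (s t : List Char) :
    PySem.List.maxD
      ((PySem.List.pyRange 0 (PySem.List.len ((PySem.List.slice? t none none (-1)).getD [])) 1).foldl
        (fun lst j =>
          if PySem.Chars.startswith s
              ((PySem.List.slice? (PySem.List.slice ((PySem.List.slice? t none none (-1)).getD []) (some j) none) none none (-1)).getD [])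
          then lst ++
            [PySem.List.len ((PySem.List.slice? (PySem.List.slice ((PySem.List.slice? t none none (-1)).getD []) (some j) none) none none (-1)).getD [])]
          else lst) [])
      id 0 = (lcpN s t : Int) := by
  rw [PySem.List.slice?_none_none_neg_one]
  simp only [Option.getD_some]
  -- the j-th tested prefix reverse_suffix[j:][::-1] is t.take (t.length - j)
  have hg : ∀ m : Nat,
      (PySem.List.slice? (PySem.List.slice t.reverse (some (m : Int)) none) none none (-1)).getD []
        = t.take (t.length - m) := by
    intro m
    rw [PySem.List.slice_from _ (Int.natCast_nonneg m), PySem.List.slice?_none_none_neg_one]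
    simp [List.drop_reverse]
  have hcond : ∀ m : Nat,
      PySem.Chars.startswith s (t.take (t.length - m)) = decide (t.length - m ≤ lcpN s t) := by
    intro m
    have h := (PySem.Chars.startswith_iff s (t.take (t.length - m))).trans
      (take_prefix_iff_le_lcpN (t.length - m) s t (by omega))
    rw [Bool.eq_iff_iff]
    simpa using h
  have hval : ∀ m : Nat,
      PySem.List.len (t.take (t.length - m)) = ((t.length - m : Nat) : Int) := by
    intro m; simp [pysem]
  rw [PySem.List.foldl_append_if
    (fun j => PySem.Chars.startswith s
      ((PySem.List.slice? (PySem.List.slice t.reverse (some j) none) none none (-1)).getD []))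
    (fun j => PySem.List.len
      ((PySem.List.slice? (PySem.List.slice t.reverse (some j) none) none none (-1)).getD []))]
  have hlen : PySem.List.len t.reverse = ((t.length : Nat) : Int) := by simp [pysem]
  rw [hlen, PySem.List.pyRange_zero_nat, List.filter_map, List.map_map, List.nil_append]
  simp only [Function.comp_def, hg, hcond, hval]
  have hL : lcpN s t ≤ t.length := lcpN_le s t
  by_cases h0 : lcpN s t = 0
  · have hnil : List.filter (fun m => decide (t.length - m ≤ lcpN s t)) (List.range t.length) = [] := by
      rw [List.filter_eq_nil_iff]
      intro m hm
      rw [List.mem_range] at hm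
      simp only [decide_eq_true_eq]
      omega
    rw [hnil]
    simp [h0, PySem.List.maxD]
    rfl
  · apply maxD_eq_of_mem_of_ub
    · rw [List.mem_map]
      refine ⟨t.length - lcpN s t, ?_, by congr 1; omega⟩
      rw [List.mem_filter, List.mem_range]
      refine ⟨by omega, by simp only [decide_eq_true_eq]; omega⟩
    · intro y hy
      rw [List.mem_map] at hy
      obtain ⟨m, hm, rfl⟩ := hy
      rw [List.mem_filter] at hm
      have h2 := hm.2
      simp only [decide_eq_true_eq] at h2
      exact_mod_cast h2

-- ===== VERDICT (by name: the statement is the Claim_ definition above) =====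
theorem string_suffix_spec : Claim_equal_string_suffix := by
  intro str_ _
  unfold Spec_string_suffix string_suffix string_suffix_alt
  simp only [PySem.List.foldl_append_singleton_eq_map, List.nil_append]
  rw [PySem.List.foldl_pyRange_zero_pyGetD
    ((PySem.List.pyRange 0 (PySem.List.len str_.toList) 1).map
      (fun i => PySem.List.slice str_.toList (some i) none)) []
    (fun total suffix => total + PySem.List.maxD
      ((PySem.List.pyRange 0 (PySem.List.len ((PySem.List.slice? suffix none none (-1)).getD [])) 1).foldl
        (fun lst j =>
          if PySem.Chars.startswith str_.toList
              ((PySem.List.slice? (PySem.List.slice ((PySem.List.slice? suffix none none (-1)).getD []) (some j) none) none none (-1)).getD [])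
          then lst ++
            [PySem.List.len ((PySem.List.slice? (PySem.List.slice ((PySem.List.slice? suffix none none (-1)).getD []) (some j) none) none none (-1)).getD [])]
          else lst) [])
      id 0) 0]
  rw [PySem.List.foldl_add]
  rw [List.map_map]
  simp only [Function.comp_def, inner_loop_eq, pvLcp_eq, zero_add]
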